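-- pv_equiv track=rewrite | github.com/joshuarocksolid/ChoreBoyCodeStudio | app/shell/shortcut_preferences.py | find_shortcut_conflicts
-- ===== SOURCE A (Python) =====
-- from typing import Any, Mapping
--
-- def normalize_shortcut(shortcut: str) -> str:
--     """Normalize shortcut text for deterministic persistence."""
--     return " ".join(shortcut.strip().split())
--
-- def find_shortcut_conflicts(shortcuts_by_action: Mapping[str, str]) -> dict[str, tuple[str, ...]]:
--     """Return shortcut -> action-id conflicts for duplicate assignments."""
--     grouped: dict[str, list[str]] = {}
--     for action_id, shortcut in shortcuts_by_action.items():
--         normalized = normalize_shortcut(shortcut)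
--         if not normalized:
--             continue
--         grouped.setdefault(normalized, []).append(action_id)
--     conflicts: dict[str, tuple[str, ...]] = {}
--     for shortcut, action_ids in grouped.items():
--         if len(action_ids) > 1:
--             conflicts[shortcut] = tuple(sorted(action_ids))
--     return conflicts
-- ===== SOURCE B (Python) =====
-- def normalize_shortcut(shortcut: str) -> str:
--     """Normalize shortcut text for deterministic persistence."""
--     return " ".join(shortcut.strip().split())
--
-- def find_shortcut_conflicts(shortcuts_by_action):
--     """Dict-free brute force: at each first occurrence of a non-empty normalized
--     shortcut, rescan the whole item list for every action bound to it."""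
--     normed = [(action_id, normalize_shortcut(shortcut))
--               for action_id, shortcut in shortcuts_by_action.items()]
--     conflicts = {}
--     seen = []
--     for _, n in normed:
--         if n and n not in seen:
--             seen.append(n)
--             ids = sorted(a for a, m in normed if m == n)
--             if len(ids) > 1:
--                 conflicts[n] = tuple(ids)
--     return conflicts
-- ===== Notes on version B (the rewrite author's own statement) =====
-- stated objective: alternative
-- what changed: B drops A's hash grouping entirely: it keeps a plain 'seen' list of normalized shortcuts and, at each first occurrence of a non-empty one, rescans the whole item list to gather every action id bound to it, emitting the sorted tuple only when there is more than one; A instead builds a norm->ids dict in one pass and then filters groups of size > 1.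
import Mathlib
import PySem

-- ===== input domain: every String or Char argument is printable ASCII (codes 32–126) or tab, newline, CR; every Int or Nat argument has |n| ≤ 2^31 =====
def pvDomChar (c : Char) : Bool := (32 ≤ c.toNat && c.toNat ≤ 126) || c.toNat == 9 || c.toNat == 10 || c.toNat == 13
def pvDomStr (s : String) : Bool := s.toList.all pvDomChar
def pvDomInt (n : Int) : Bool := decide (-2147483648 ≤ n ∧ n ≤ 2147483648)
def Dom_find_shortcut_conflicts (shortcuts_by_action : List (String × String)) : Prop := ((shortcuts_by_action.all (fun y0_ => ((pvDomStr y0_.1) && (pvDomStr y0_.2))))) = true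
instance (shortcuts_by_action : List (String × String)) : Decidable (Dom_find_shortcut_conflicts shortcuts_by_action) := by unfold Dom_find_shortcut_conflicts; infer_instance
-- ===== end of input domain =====

-- B replaces A's hash grouping by a dict-free brute force: a plain 'seen' list plus, at each
-- first occurrence of a non-empty normalized shortcut, a full rescan collecting its action ids
-- (alternative decomposition, quadratic); return-value equivalence only.

-- ===== PORT A =====
-- normalize_shortcut: " ".join(shortcut.strip().split())
def pvNormalizeShortcut (shortcut : String) : String :=
  PySem.Str.join " " (PySem.Str.split₀ (PySem.Str.strip shortcut))

-- the dict parameter arrives as an assoc list; PySem.Dict.ofList reproduces Python's dict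
-- construction (duplicate keys: last value wins at the first position), .items its iteration order
def find_shortcut_conflicts (shortcuts_by_action : List (String × String)) : List (String × List String) :=
  let items := (PySem.Dict.ofList shortcuts_by_action).items
  -- grouped: dict[str, list[str]]; setdefault(n, []).append(aid) = modify n [] (· ++ [aid])
  let grouped : PySem.Dict String (List String) :=
    items.foldl (fun d p =>
      if pvNormalizeShortcut p.2 = "" then d
      else d.modify (pvNormalizeShortcut p.2) [] (· ++ [p.1])) PySem.Dict.empty
  -- conflicts: dict built from groups with more than one action id, values sorted
  let conflicts : PySem.Dict String (List String) :=
    grouped.items.foldl (fun c p =>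
      if 1 < p.2.length then c.insert p.1 (PySem.List.sorted p.2 (fun x => x)) else c)
      PySem.Dict.empty
  conflicts.items

-- ===== PORT B =====
-- ids = sorted(a for a, m in normed if m == n)
def pvSid (normed : List (String × String)) (n : String) : List String :=
  PySem.List.sorted ((normed.filter (fun q => q.2 == n)).map Prod.fst) (fun x => x)

def find_shortcut_conflicts_alt (shortcuts_by_action : List (String × String)) : List (String × List String) :=
  let normed := (PySem.Dict.ofList shortcuts_by_action).items.map
    (fun p => (p.1, pvNormalizeShortcut p.2))
  -- state = (conflicts dict, seen list); 'if n and n not in seen': append n, rescan, emit if >1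
  (normed.foldl (fun (st : PySem.Dict String (List String) × List String) p =>
      if p.2 ≠ "" ∧ p.2 ∉ st.2 then
        if 1 < (pvSid normed p.2).length
        then (st.1.insert p.2 (pvSid normed p.2), st.2 ++ [p.2])
        else (st.1, st.2 ++ [p.2])
      else st)
    (PySem.Dict.empty, [])).1.items

-- ===== PRECONDITION & SPEC =====
def Spec_find_shortcut_conflicts (shortcuts_by_action : List (String × String)) (out : List (String × List String)) : Prop := out = find_shortcut_conflicts_alt shortcuts_by_action
instance (shortcuts_by_action : List (String × String)) (out : List (String × List String)) : Decidable (Spec_find_shortcut_conflicts shortcuts_by_action out) := by unfold Spec_find_shortcut_conflicts; infer_instance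

-- ===== CLAIM (what is proved, stated in full; the proofs are below) =====
def Claim_equal_find_shortcut_conflicts : Prop := ∀ (shortcuts_by_action : List (String × String)), Dom_find_shortcut_conflicts shortcuts_by_action → Spec_find_shortcut_conflicts shortcuts_by_action (find_shortcut_conflicts shortcuts_by_action)

-- ===== LEMMAS AND PROOFS =====

-- (norm, action_id) view of an items pair
def pvNormOf (p : String × String) : String × String := (pvNormalizeShortcut p.2, p.1)
-- the normalized shortcuts, in items order
def pvNorms (L : List (String × String)) : List String :=
  L.map (fun p => pvNormalizeShortcut p.2)
-- canonical grouping fold (A's grouping loop)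
def pvGroup (q : List (String × String)) : PySem.Dict String (List String) :=
  q.foldl (fun d x => d.modify x.1 [] (· ++ [x.2])) PySem.Dict.empty
-- ids grouped under key n
def pvIds (q : List (String × String)) (n : String) : List String :=
  (q.filter (fun x => x.1 == n)).map (fun x => x.2)
-- what B's loop appends to the result dict, as a list
def pvEmit (normed : List (String × String)) : List String → List (String × String) → List (String × List String)
  | _, [] => []
  | s, p :: t =>
    if p.2 ≠ "" ∧ p.2 ∉ s then
      (if 1 < (pvSid normed p.2).length then [(p.2, pvSid normed p.2)] else [])
        ++ pvEmit normed (s ++ [p.2]) t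
    else pvEmit normed s t
-- the new distinct non-empty norms B's loop sees, in order
def pvNew : List String → List (String × String) → List String
  | _, [] => []
  | s, p :: t => if p.2 ≠ "" ∧ p.2 ∉ s then p.2 :: pvNew (s ++ [p.2]) t else pvNew s t

-- ----- A-side lemmas -----

theorem pv_group_keys (q : List (String × String)) :
    (pvGroup q).keys = PySem.Set.ofList (q.map Prod.fst) := by
  have h := PySem.Dict.keys_foldl_modify_key q (fun x => x.1) []
    (fun _ x => (· ++ [x.2])) PySem.Dict.empty
  simpa [pvGroup, PySem.Dict.keys_empty, PySem.Set.update_empty] using h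

theorem pv_group_getD (q : List (String × String)) (n : String) :
    (pvGroup q).getD n [] = pvIds q n := by
  have h := PySem.Dict.getD_foldl_modify_append q PySem.Dict.empty n
  simpa [pvGroup, pvIds, PySem.Dict.getD_empty] using h

theorem pv_group_items (q : List (String × String)) :
    (pvGroup q).items
      = (PySem.Set.ofList (q.map Prod.fst)).map (fun n => (n, pvIds q n)) := by
  have hnd : (pvGroup q).keys.Nodup := by
    rw [pv_group_keys]; exact PySem.Set.nodup_ofList _
  rw [PySem.Dict.items_eq_map_keys _ hnd [], pv_group_keys]
  exact List.map_congr_left (fun n _ => by rw [pv_group_getD])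

-- guarded fold over a mapped list = plain fold over the filtered mapped list
theorem pv_foldl_guard_map {α β δ : Type} (l : List α) (key : α → β) (p : β → Bool)
    (f : δ → β → δ) (init : δ) :
    l.foldl (fun d x => if p (key x) then f d (key x) else d) init
      = ((l.map key).filter p).foldl f init := by
  induction l generalizing init with
  | nil => rfl
  | cons a t ih =>
      simp only [List.foldl_cons, List.map_cons, List.filter_cons]
      cases h : p (key a) <;> simp [ih]

theorem pv_foldl_guard {α δ : Type} (l : List α) (p : α → Bool)
    (f : δ → α → δ) (init : δ) :
    l.foldl (fun d x => if p x then f d x else d) init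
      = (l.filter p).foldl f init := by
  induction l generalizing init with
  | nil => rfl
  | cons a t ih =>
      simp only [List.foldl_cons, List.filter_cons]
      cases h : p a <;> simp [ih]

theorem pv_filter_map_fst (p : String → Bool) (L : List (String × String)) :
    ((L.map pvNormOf).filter (fun q => p q.1)).map Prod.fst
      = (pvNorms L).filter p := by
  induction L with
  | nil => rfl
  | cons a t ih =>
      simp only [List.map_cons, List.filter_cons, pvNorms, pvNormOf]
      cases h : p (pvNormalizeShortcut a.2) <;>
        simpa [h, pvNormOf, pvNorms] using ih

theorem pv_fst_qA (L : List (String × String)) :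
    ((L.map pvNormOf).filter (fun q => !(q.1 == ""))).map Prod.fst
      = (pvNorms L).filter (fun n => !(n == "")) :=
  pv_filter_map_fst (fun n => !(n == "")) L

-- items of the conflict-building loop of A
theorem pv_conflict_items (M : List (String × List String))
    (hnd : (M.map Prod.fst).Nodup) :
    (M.foldl (fun c p => if 1 < p.2.length
        then c.insert p.1 (PySem.List.sorted p.2 (fun x => x)) else c)
      PySem.Dict.empty).items
    = (M.filter (fun p => decide (1 < p.2.length))).map
        (fun p => (p.1, PySem.List.sorted p.2 (fun x => x))) := by
  have h1 : M.foldl (fun c p => if 1 < p.2.length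
        then c.insert p.1 (PySem.List.sorted p.2 (fun x => x)) else c) PySem.Dict.empty
      = M.foldl (fun c p => if decide (1 < p.2.length)
        then c.insert p.1 (PySem.List.sorted p.2 (fun x => x)) else c) PySem.Dict.empty := by
    congr 1
    funext c p
    by_cases h : 1 < p.2.length <;> simp [h]
  rw [h1, pv_foldl_guard]
  have hnd' : ((M.filter (fun p => decide (1 < p.2.length))).map Prod.fst).Nodup :=
    hnd.sublist (List.Sublist.map Prod.fst (List.filter_sublist))
  have h2 := PySem.Dict.items_foldl_insert_fresh
    (M.filter (fun p => decide (1 < p.2.length))) Prod.fst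
    (fun p => PySem.List.sorted p.2 (fun x => x)) PySem.Dict.empty
    (fun a _ => PySem.Dict.contains_empty _) hnd'
  simpa using h2

-- nodup of the first components of grouped items
theorem pv_group_nodup_fst (q : List (String × String)) :
    ((pvGroup q).items.map Prod.fst).Nodup := by
  rw [pv_group_items, List.map_map]
  have : (Prod.fst ∘ fun n => (n, pvIds q n)) = id := rfl
  rw [this, List.map_id]
  exact PySem.Set.nodup_ofList _

-- ----- B-side lemmas -----

-- B's loop appends pvEmit to the dict carried in the state
theorem pv_fold_emit (normed : List (String × String)) (rest : List (String × String))
    (d : PySem.Dict String (List String)) (s : List String)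
    (hinv : ∀ k, d.contains k = true → k ∈ s) :
    (rest.foldl (fun (st : PySem.Dict String (List String) × List String) p =>
        if p.2 ≠ "" ∧ p.2 ∉ st.2 then
          if 1 < (pvSid normed p.2).length
          then (st.1.insert p.2 (pvSid normed p.2), st.2 ++ [p.2])
          else (st.1, st.2 ++ [p.2])
        else st) (d, s)).1.items
      = d.items ++ pvEmit normed s rest := by
  induction rest generalizing d s with
  | nil => simp [pvEmit]
  | cons p t ih =>
    simp only [List.foldl_cons, pvEmit]
    by_cases hc : p.2 ≠ "" ∧ p.2 ∉ s
    · rw [if_pos hc, if_pos hc]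
      have hd : d.contains p.2 = false := by
        cases h : d.contains p.2
        · rfl
        · exact absurd (hinv p.2 h) hc.2
      have hinv' : ∀ k, d.contains k = true → k ∈ s ++ [p.2] :=
        fun k hk => List.mem_append_left _ (hinv k hk)
      by_cases hl : 1 < (pvSid normed p.2).length
      · rw [if_pos hl, if_pos hl]
        rw [ih (d.insert p.2 (pvSid normed p.2)) (s ++ [p.2]) ?_]
        · rw [PySem.Dict.items_insert_of_not_contains _ _ hd]
          simp
        · intro k hk
          rw [PySem.Dict.contains_insert] at hk
          rcases Bool.or_eq_true_iff.mp hk with h | h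
          · exact List.mem_append_right _ (by simpa using (eq_of_beq h))
          · exact hinv' k h
      · rw [if_neg hl, if_neg hl, ih d (s ++ [p.2]) hinv']
        simp
    · rw [if_neg hc, if_neg hc]
      exact ih d s hinv

-- pvEmit is the filtered/mapped version of pvNew
theorem pv_emit_eq (normed : List (String × String)) (rest : List (String × String))
    (s : List String) :
    pvEmit normed s rest
      = ((pvNew s rest).filter (fun n => decide (1 < (pvSid normed n).length))).map
          (fun n => (n, pvSid normed n)) := by
  induction rest generalizing s with
  | nil => rfl
  | cons p t ih =>
    simp only [pvEmit, pvNew]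
    by_cases hc : p.2 ≠ "" ∧ p.2 ∉ s
    · rw [if_pos hc, if_pos hc, List.filter_cons]
      by_cases hl : 1 < (pvSid normed p.2).length <;> simp [hl, ih]
    · rw [if_neg hc, if_neg hc]; exact ih s

-- pvNew accumulates exactly like PySem.Set.add over the non-empty norms
theorem pv_new_add (rest : List (String × String)) (s : List String) :
    s ++ pvNew s rest
      = ((rest.map Prod.snd).filter (fun n => !(n == ""))).foldl PySem.Set.add s := by
  induction rest generalizing s with
  | nil => simp [pvNew]
  | cons p t ih =>
    simp only [pvNew, List.map_cons, List.filter_cons]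
    by_cases h0 : p.2 = ""
    · rw [if_neg (by simp [h0] : ¬((!(p.2 == "")) = true)),
        if_neg (by simp [h0] : ¬ (p.2 ≠ "" ∧ p.2 ∉ s))]
      exact ih s
    · rw [if_pos (by simp [h0] : (!(p.2 == "")) = true), List.foldl_cons]
      by_cases hm : p.2 ∈ s
      · rw [if_neg (by simp [hm]), PySem.Set.add_of_mem hm]
        exact ih s
      · rw [if_pos ⟨h0, hm⟩, PySem.Set.add_of_not_mem hm]
        simpa using ih (s ++ [p.2])

theorem pv_new_ofList (rest : List (String × String)) :
    pvNew [] rest = PySem.Set.ofList ((rest.map Prod.snd).filter (fun n => !(n == ""))) := by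
  have h := pv_new_add rest []
  rw [PySem.Set.ofList_eq_foldl]
  simpa using h

-- the non-empty norms of B's normed list are exactly A's grouping keys
theorem pv_normed_snd (L : List (String × String)) :
    (L.map (fun p => (p.1, pvNormalizeShortcut p.2))).map Prod.snd = pvNorms L := by
  simp [pvNorms, List.map_map, Function.comp_def]

-- B's rescan for a non-empty key yields A's group for that key
theorem pv_ids_eq (L : List (String × String)) (n : String) (hn : n ≠ "") :
    ((L.map (fun p => (p.1, pvNormalizeShortcut p.2))).filter (fun q => q.2 == n)).map Prod.fst
      = pvIds ((L.map pvNormOf).filter (fun x => !(x.1 == ""))) n := by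
  induction L with
  | nil => rfl
  | cons a t ih =>
    simp only [List.map_cons, List.filter_cons, pvNormOf, pvIds] at *
    by_cases h : pvNormalizeShortcut a.2 = n
    · simp [h, hn, ih]
    · by_cases h2 : pvNormalizeShortcut a.2 = "" <;> simp [h, h2, hn, ih]

-- the main equivalence, over an arbitrary items list
theorem pv_core (l : List (String × String)) :
    find_shortcut_conflicts l = find_shortcut_conflicts_alt l := by
  simp only [find_shortcut_conflicts, find_shortcut_conflicts_alt]
  generalize (PySem.Dict.ofList l).items = L
  set normed := L.map (fun p => (p.1, pvNormalizeShortcut p.2)) with hnormed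
  set q := (L.map pvNormOf).filter (fun x => !(x.1 == "")) with hq
  -- A's grouping loop is the canonical grouping fold over the non-empty (norm, id) pairs
  have hGA : L.foldl (fun d p => if pvNormalizeShortcut p.2 = "" then d
        else d.modify (pvNormalizeShortcut p.2) [] (· ++ [p.1])) PySem.Dict.empty
      = pvGroup q := by
    have e1 : L.foldl (fun d p => if pvNormalizeShortcut p.2 = "" then d
          else d.modify (pvNormalizeShortcut p.2) [] (· ++ [p.1])) PySem.Dict.empty
        = L.foldl (fun d x => if (fun y : String × String => !(y.1 == "")) (pvNormOf x)
            then (fun (d : PySem.Dict String (List String)) (x : String × String) =>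
              d.modify x.1 [] (· ++ [x.2])) d (pvNormOf x) else d) PySem.Dict.empty := by
      refine congrArg (fun f => List.foldl f PySem.Dict.empty L) ?_
      funext d p
      by_cases h : pvNormalizeShortcut p.2 = "" <;> simp [h, pvNormOf]
    have e2 := pv_foldl_guard_map L pvNormOf (fun y => !(y.1 == ""))
      (fun (d : PySem.Dict String (List String)) (x : String × String) =>
        d.modify x.1 [] (· ++ [x.2])) PySem.Dict.empty
    exact e1.trans (e2.trans rfl)
  rw [hGA, pv_conflict_items _ (pv_group_nodup_fst _), pv_group_items,
    List.filter_map, List.map_map]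
  -- B's side
  rw [pv_fold_emit normed normed PySem.Dict.empty []
      (fun k hk => absurd hk (by simp [PySem.Dict.contains_empty])),
    pv_emit_eq, pv_new_ofList, pv_normed_snd]
  have hKeys : (pvNorms L).filter (fun n => !(n == "")) = q.map Prod.fst :=
    (pv_fst_qA L).symm
  rw [hKeys]
  have he : (PySem.Dict.empty : PySem.Dict String (List String)).items = [] := rfl
  rw [he, List.nil_append]
  -- agree on each distinct key: pvSid is sorted of A's group, lengths match
  have hmem : ∀ n ∈ PySem.Set.ofList (q.map Prod.fst),
      pvSid normed n = PySem.List.sorted (pvIds q n) (fun x => x) := by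
    intro n hn
    have hn' : n ∈ q.map Prod.fst := by simpa [PySem.Set.mem_ofList] using hn
    obtain ⟨x, hxmem, hxn⟩ := List.mem_map.mp hn'
    have hx := List.of_mem_filter hxmem
    rw [hxn] at hx
    have hne : n ≠ "" := by simpa using hx
    rw [pvSid, pv_ids_eq L n hne]
  have hfil : (PySem.Set.ofList (q.map Prod.fst)).filter
        ((fun p : String × List String => decide (1 < p.2.length)) ∘
          fun n => (n, pvIds q n))
      = (PySem.Set.ofList (q.map Prod.fst)).filter
          (fun n => decide (1 < (pvSid normed n).length)) := by
    refine List.filter_congr (fun n hn => ?_)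
    simp only [Function.comp, hmem n hn, PySem.List.length_sorted]
  rw [hfil]
  refine List.map_congr_left (fun n hn => ?_)
  have hn' : n ∈ PySem.Set.ofList (q.map Prod.fst) := (List.mem_filter.mp hn).1
  simp only [Function.comp, hmem n hn']

-- ===== VERDICT (by name: the statement is the Claim_ definition above) =====
theorem find_shortcut_conflicts_spec : Claim_equal_find_shortcut_conflicts := by
  intro l _hdom
  unfold Spec_find_shortcut_conflicts
  exact pv_core l
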